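-- pv_equiv track=rewrite | github.com/EinPy/Competition_lib | CodeForces/Practice/Everything/makeItIncreasing.py | solve
-- ===== SOURCE A (Python) =====
-- def solve(n,arr):
--
--     ops = 0
--     for i in range(n-2, -1, -1):
--         while arr[i] >= arr[i+1] and arr[i] != 0:
--             arr[i] = arr[i] // 2
--             ops += 1
--         if arr[i+1] == 0:
--             return -1
--
--     return ops
-- ===== SOURCE B (Python) =====
-- def solve(n, arr):
--     # Return-value re-implementation: closed-form halving counts via bit_length
--     # instead of A's inner while-loop.  NOTE: A mutates arr in place; B does not
--     # (the equivalence claimed is about the return value only).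
--     if n < 2:
--         return 0
--     ops = 0
--     cur = arr[n - 1]
--     for i in range(n - 2, -1, -1):
--         if cur == 0:
--             return -1
--         a = arr[i]
--         if a < cur:
--             k = 0
--         else:
--             k0 = a.bit_length() - cur.bit_length()
--             k = k0 + 1 if (a >> k0) >= cur else k0
--         ops += k
--         cur = a >> k
--     return ops
-- ===== Notes on version B (the rewrite author's own statement) =====
-- stated objective: alternative
-- what changed: Replaces A's inner repeated-halving while-loop (and in-place mutation of arr) with a single right-to-left pass that computes each halving count k in closed form from bit_length and one shift, carrying only the current threshold.
-- outside the precondition, e.g. on solve(2, [-3, 5]): A returns 0, B returns 0; on solve(2, [-1, -1]): A does not finish within the time limit, B returns 1; on solve(2, [5, -3]): A returns 3, B returns 2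
import Mathlib
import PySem

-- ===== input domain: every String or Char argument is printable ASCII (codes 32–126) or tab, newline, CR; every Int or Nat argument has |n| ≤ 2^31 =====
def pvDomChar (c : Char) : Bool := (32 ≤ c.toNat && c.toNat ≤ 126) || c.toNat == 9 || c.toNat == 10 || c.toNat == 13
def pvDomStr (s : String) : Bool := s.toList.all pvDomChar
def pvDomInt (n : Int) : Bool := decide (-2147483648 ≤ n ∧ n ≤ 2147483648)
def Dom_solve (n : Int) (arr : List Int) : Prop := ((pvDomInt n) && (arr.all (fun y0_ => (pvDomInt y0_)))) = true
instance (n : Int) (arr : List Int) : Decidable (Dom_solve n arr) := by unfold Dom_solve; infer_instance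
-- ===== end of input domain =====

-- B replaces A's inner repeated-halving while-loop by a closed-form bit_length count (alternative
-- algorithm; return value only — the Python A mutates arr in place, B does not).


-- ===== PORT A =====
-- inner while-loop 'while arr[i] >= arr[i+1] and arr[i] != 0: arr[i] //= 2; ops += 1'
-- returns (final arr[i], iterations).  The fuel argument only makes the recursion total;
-- inside Pre_ (0 ≤ arr[i]) fuel arr[i].toNat + 1 is never exhausted.
def halveLoopA : Nat → Int → Int → Int × Int
  | 0, a, _ => (a, 0)
  | f + 1, a, t =>
    if t ≤ a ∧ a ≠ 0 then
      ((halveLoopA f (PySem.Int.floordiv a 2) t).1, (halveLoopA f (PySem.Int.floordiv a 2) t).2 + 1)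
    else (a, 0)

-- the 'for i in range(n-2, -1, -1)' loop, carrying the mutated arr and ops
def solveGoA : List Int → Int → List Int → Int
  | _, ops, [] => ops
  | arr, ops, i :: rest =>
    let a := PySem.List.pyGetD arr i 0
    let b := PySem.List.pyGetD arr (i + 1) 0
    let r := halveLoopA (a.toNat + 1) a b
    let arr' := PySem.List.pySetD arr i r.1
    if b = 0 then -1 else solveGoA arr' (ops + r.2) rest

def solve (n : Int) (arr : List Int) : Int :=
  solveGoA arr 0 (PySem.List.pyRange (n - 2) (-1) (-1))

-- ===== PORT B =====
-- B's per-step halving count k (the if/else assignment of k in Source B);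
-- Python's a.bit_length() is PySem.Int.bitLength, Python's a >> k is Lean's a >>> k
def kB (a cur : Int) : Int :=
  if a < cur then 0
  else if cur ≤ a >>> ((PySem.Int.bitLength a : Int) - (PySem.Int.bitLength cur : Int)).toNat
    then (PySem.Int.bitLength a : Int) - (PySem.Int.bitLength cur : Int) + 1
    else (PySem.Int.bitLength a : Int) - (PySem.Int.bitLength cur : Int)

def solveGoB : List Int → Int → Int → List Int → Int
  | _, ops, _, [] => ops
  | arr, ops, cur, i :: rest =>
    if cur = 0 then -1
    else
      let a := PySem.List.pyGetD arr i 0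
      let k := kB a cur
      solveGoB arr (ops + k) (a >>> k.toNat) rest

def solve_alt (n : Int) (arr : List Int) : Int :=
  if n < 2 then 0
  else solveGoB arr 0 (PySem.List.pyGetD arr (n - 1) 0) (PySem.List.pyRange (n - 2) (-1) (-1))

-- ===== PRECONDITION & SPEC =====
-- Pre_ restricts to the task's natural domain: the indices A touches exist (n ≤ len(arr);
-- otherwise A raises IndexError) and all elements are nonnegative (on a negative element A's
-- floor-halving loop can diverge, -1 // 2 == -1; negative inputs are outside the problem's domain).
def Pre_solve (n : Int) (arr : List Int) : Prop :=
  (2 ≤ n → n ≤ (arr.length : Int)) ∧ ∀ x ∈ arr, 0 ≤ x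
instance (n : Int) (arr : List Int) : Decidable (Pre_solve n arr) := by unfold Pre_solve; infer_instance

def pvWitness_solve : Int × List Int := (3, [5, 4, 3])

def Spec_solve (n : Int) (arr : List Int) (out : Int) : Prop := out = solve_alt n arr
instance (n : Int) (arr : List Int) (out : Int) : Decidable (Spec_solve n arr out) := by unfold Spec_solve; infer_instance

-- ===== CLAIM (what is proved, stated in full; the proofs are below) =====
def Claim_equal_solve : Prop := ∀ (n : Int) (arr : List Int), Dom_solve n arr → Pre_solve n arr → Spec_solve n arr (solve n arr)

-- ===== LEMMAS AND PROOFS =====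

-- Nat-level version of B's halving count
def kbN (A T : Nat) : Nat :=
  if A < T then 0
  else if T ≤ A / 2 ^ (PySem.Int.bitLength (A : Int) - PySem.Int.bitLength (T : Int))
    then PySem.Int.bitLength (A : Int) - PySem.Int.bitLength (T : Int) + 1
    else PySem.Int.bitLength (A : Int) - PySem.Int.bitLength (T : Int)

lemma div_pow_anti (A : Nat) {j k : Nat} (h : j ≤ k) : A / 2 ^ k ≤ A / 2 ^ j :=
  Nat.div_le_div_left (Nat.pow_le_pow_right (by norm_num) h) (Nat.pow_pos (by norm_num))

lemma count_unique {A T x y : Nat}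
    (hx1 : A / 2 ^ x < T) (hx2 : ∀ j < x, T ≤ A / 2 ^ j)
    (hy1 : A / 2 ^ y < T) (hy2 : ∀ j < y, T ≤ A / 2 ^ j) : x = y := by
  rcases Nat.lt_trichotomy x y with h | h | h
  · exact absurd (hy2 x h) (by omega)
  · exact h
  · exact absurd (hx2 y h) (by omega)

lemma bitLength_lt (A : Nat) : A < 2 ^ PySem.Int.bitLength (A : Int) := by
  have := PySem.Int.lt_two_pow_bitLength (A : Int)
  simpa using this

lemma bitLength_le (A : Nat) (hA : A ≠ 0) : 2 ^ (PySem.Int.bitLength (A : Int) - 1) ≤ A := by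
  have := PySem.Int.two_pow_bitLength_le (A : Int) (by exact_mod_cast hA)
  simpa using this

lemma bitLength_mono {T A : Nat} (hT : 1 ≤ T) (h : T ≤ A) :
    PySem.Int.bitLength (T : Int) ≤ PySem.Int.bitLength (A : Int) := by
  by_contra hlt
  have h1 : A < 2 ^ PySem.Int.bitLength (A : Int) := bitLength_lt A
  have h2 : 2 ^ (PySem.Int.bitLength (T : Int) - 1) ≤ T := bitLength_le T (by omega)
  have h3 : 2 ^ PySem.Int.bitLength (A : Int) ≤ 2 ^ (PySem.Int.bitLength (T : Int) - 1) :=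
    Nat.pow_le_pow_right (by norm_num) (by omega)
  omega

lemma bitLength_pos {T : Nat} (hT : 1 ≤ T) : 1 ≤ PySem.Int.bitLength (T : Int) := by
  have h1 : T < 2 ^ PySem.Int.bitLength (T : Int) := bitLength_lt T
  by_contra h
  have h0 : PySem.Int.bitLength (T : Int) = 0 := by omega
  rw [h0, pow_zero] at h1
  omega

-- B's count is exactly "the minimal j with A / 2^j < T"
lemma kb_char (A T : Nat) (hT : 1 ≤ T) :
    A / 2 ^ kbN A T < T ∧ ∀ j < kbN A T, T ≤ A / 2 ^ j := by
  by_cases hlt : A < T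
  · rw [kbN, if_pos hlt]
    exact ⟨by simpa using hlt, by omega⟩
  · have hle : T ≤ A := by omega
    rw [kbN, if_neg hlt]
    have hAlt : A < 2 ^ PySem.Int.bitLength (A : Int) := bitLength_lt A
    have hTlt : T < 2 ^ PySem.Int.bitLength (T : Int) := bitLength_lt T
    have hAge : 2 ^ (PySem.Int.bitLength (A : Int) - 1) ≤ A := bitLength_le A (by omega)
    have hTge : 2 ^ (PySem.Int.bitLength (T : Int) - 1) ≤ T := bitLength_le T (by omega)
    have hmono : PySem.Int.bitLength (T : Int) ≤ PySem.Int.bitLength (A : Int) :=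
      bitLength_mono hT hle
    have hTpos : 1 ≤ PySem.Int.bitLength (T : Int) := bitLength_pos hT
    set bA := PySem.Int.bitLength (A : Int) with hbA
    set bT := PySem.Int.bitLength (T : Int) with hbT
    by_cases hc : T ≤ A / 2 ^ (bA - bT)
    · rw [if_pos hc]
      constructor
      · rw [Nat.div_lt_iff_lt_mul (Nat.pow_pos (by norm_num))]
        calc A < 2 ^ bA := hAlt
          _ = 2 ^ (bT - 1) * 2 ^ (bA - bT + 1) := by rw [← pow_add]; congr 1; omega
          _ ≤ T * 2 ^ (bA - bT + 1) := Nat.mul_le_mul_right _ hTge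
      · intro j hj
        exact le_trans hc (div_pow_anti A (by omega))
    · rw [if_neg hc]
      refine ⟨by omega, ?_⟩
      intro j hj
      have hstep : T ≤ A / 2 ^ (bA - bT - 1) := by
        rw [Nat.le_div_iff_mul_le (Nat.pow_pos (by norm_num))]
        refine le_of_lt ?_
        calc T * 2 ^ (bA - bT - 1) < 2 ^ bT * 2 ^ (bA - bT - 1) :=
              mul_lt_mul_of_pos_right hTlt (Nat.pow_pos (by norm_num))
          _ = 2 ^ (bA - 1) := by rw [← pow_add]; congr 1; omega
          _ ≤ A := hAge
      exact le_trans hstep (div_pow_anti A (by omega))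

-- A's while-loop terminates within fuel and computes SOME minimal halving count
lemma halve_char (A : Nat) : ∀ (f : Nat), A < f → ∀ (T : Nat), 1 ≤ T →
    ∃ K : Nat, halveLoopA f (A : Int) (T : Int) = (((A / 2 ^ K : Nat) : Int), (K : Int)) ∧
      A / 2 ^ K < T ∧ ∀ j < K, T ≤ A / 2 ^ j := by
  induction A using Nat.strong_induction_on with
  | _ A IH =>
    intro f hf T hT
    match f, hf with
    | f + 1, hf =>
      by_cases hcond : A < T
      · refine ⟨0, ?_, by simpa using hcond, by omega⟩
        simp only [halveLoopA]
        rw [if_neg]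
        · simp
        · rintro ⟨hTA, -⟩
          exact absurd (by exact_mod_cast hTA : T ≤ A) (by omega)
      · have hle : T ≤ A := by omega
        have hA1 : 1 ≤ A := le_trans hT hle
        have hfd : PySem.Int.floordiv (A : Int) 2 = ((A / 2 : Nat) : Int) := by
          exact_mod_cast PySem.Int.floordiv_natCast A 2
        obtain ⟨K', hK', h1, h2⟩ := IH (A / 2) (by omega) f (by omega) T hT
        refine ⟨K' + 1, ?_, ?_, ?_⟩
        · simp only [halveLoopA]
          rw [if_pos ⟨(by exact_mod_cast hle : (T : Int) ≤ (A : Int)),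
                (by exact_mod_cast (by omega : A ≠ 0) : (A : Int) ≠ 0)⟩, hfd, hK']
          simp only [Prod.mk.injEq]
          refine ⟨?_, by push_cast; ring⟩
          congr 1
          rw [Nat.div_div_eq_div_mul, ← pow_succ']
        · rw [pow_succ', ← Nat.div_div_eq_div_mul]; exact h1
        · intro j hj
          match j with
          | 0 => simpa using hle
          | j + 1 =>
            have := h2 j (by omega)
            rwa [Nat.div_div_eq_div_mul, ← pow_succ'] at this

lemma shiftRight_cast (A k : Nat) : (A : Int) >>> k = ((A / 2 ^ k : Nat) : Int) := by
  rw [show ((A : Int) >>> k) = ((A >>> k : Nat) : Int) from rfl, Nat.shiftRight_eq_div_pow]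

lemma kB_cast (A T : Nat) (hT : 1 ≤ T) : kB (A : Int) (T : Int) = ((kbN A T : Nat) : Int) := by
  by_cases hlt : A < T
  · rw [kB, if_pos (by exact_mod_cast hlt : (A : Int) < (T : Int)), kbN, if_pos hlt]
    simp
  · have hle : T ≤ A := by omega
    have hmono : PySem.Int.bitLength (T : Int) ≤ PySem.Int.bitLength (A : Int) :=
      bitLength_mono hT hle
    have hk0 : ((PySem.Int.bitLength (A : Int) : Int) - (PySem.Int.bitLength (T : Int) : Int)).toNat
        = PySem.Int.bitLength (A : Int) - PySem.Int.bitLength (T : Int) := by omega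
    have hsh : (A : Int) >>> ((PySem.Int.bitLength (A : Int) : Int) - (PySem.Int.bitLength (T : Int) : Int)).toNat
        = ((A / 2 ^ (PySem.Int.bitLength (A : Int) - PySem.Int.bitLength (T : Int)) : Nat) : Int) := by
      rw [hk0]; exact shiftRight_cast A _
    rw [kB, if_neg (by exact_mod_cast hlt : ¬ ((A : Int) < (T : Int))), kbN, if_neg hlt, hsh]
    by_cases hc : T ≤ A / 2 ^ (PySem.Int.bitLength (A : Int) - PySem.Int.bitLength (T : Int))
    · rw [if_pos (by exact_mod_cast hc), if_pos hc]
      omega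
    · rw [if_neg (by exact_mod_cast hc : ¬ ((T : Int) ≤ ((A / 2 ^ (PySem.Int.bitLength (A : Int) - PySem.Int.bitLength (T : Int)) : Nat) : Int))), if_neg hc]
      omega

-- A's loop result written with B's closed-form count
lemma halve_eq_kB (a cur : Int) (ha : 0 ≤ a) (hc : 0 < cur) :
    halveLoopA (a.toNat + 1) a cur = (a >>> (kB a cur).toNat, kB a cur) := by
  obtain ⟨A, rfl⟩ : ∃ A : Nat, a = (A : Int) := ⟨a.toNat, by omega⟩
  obtain ⟨T, rfl⟩ : ∃ T : Nat, cur = (T : Int) := ⟨cur.toNat, by omega⟩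
  have hT : 1 ≤ T := by exact_mod_cast hc
  obtain ⟨K, hEq, h1, h2⟩ := halve_char A (A + 1) (by omega) T hT
  obtain ⟨h1', h2'⟩ := kb_char A T hT
  have hKk : K = kbN A T := count_unique h1 h2 h1' h2'
  rw [Int.toNat_natCast, kB_cast A T hT, Int.toNat_natCast, shiftRight_cast, hEq, hKk]

-- B's loop only reads indices in its index list
lemma goB_congr : ∀ (l : List Int) (arr arr' : List Int) (ops cur : Int),
    (∀ i ∈ l, PySem.List.pyGetD arr i 0 = PySem.List.pyGetD arr' i 0) →
    solveGoB arr ops cur l = solveGoB arr' ops cur l := by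
  intro l
  induction l with
  | nil => intro arr arr' ops cur _; rfl
  | cons i rest ih =>
    intro arr arr' ops cur h
    simp only [solveGoB]
    rw [h i (by simp)]
    by_cases hc : cur = 0
    · simp [hc]
    · simp only [if_neg hc]
      exact ih arr arr' _ _ (fun j hj => h j (by simp [hj]))

-- the main loop invariant: with cur = current arr[m], both loops agree on indices m-1 .. 0
lemma go_eq : ∀ (m : Nat) (arr : List Int) (ops cur : Int),
    m < arr.length →
    (∀ x ∈ arr, 0 ≤ x) →
    PySem.List.pyGetD arr (m : Int) 0 = cur →
    solveGoA arr ops (PySem.List.pyRange ((m : Int) - 1) (-1) (-1)) =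
    solveGoB arr ops cur (PySem.List.pyRange ((m : Int) - 1) (-1) (-1)) := by
  intro m
  induction m with
  | zero =>
    intro arr ops cur _ _ _
    rw [PySem.List.pyRange_neg_one_eq_nil (by norm_num)]
    rfl
  | succ m ih =>
    intro arr ops cur hlen hnn hcur
    have hstep : ((m : Int) + 1) - 1 = (m : Int) := by ring
    rw [show (((m : Nat) + 1 : Nat) : Int) - 1 = (m : Int) by push_cast; ring,
        PySem.List.pyRange_neg_one_cons (by omega : (-1 : Int) < (m : Int))]
    simp only [solveGoA, solveGoB]
    have hm1 : ((m : Int) + 1) = (((m + 1 : Nat) : Nat) : Int) := by push_cast; ring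
    have hb : PySem.List.pyGetD arr ((m : Int) + 1) 0 = cur := by rw [hm1]; exact hcur
    rw [hb]
    by_cases hc : cur = 0
    · simp [hc]
    · simp only [if_neg hc]
      have hmem : cur ∈ arr := by
        rw [← hcur, PySem.List.pyGetD_eq_getElem arr 0 (by omega) (by exact_mod_cast hlen)]
        exact List.getElem_mem _
      have hcpos : 0 < cur := lt_of_le_of_ne (hnn cur hmem) (Ne.symm hc)
      have hamem : PySem.List.pyGetD arr (m : Int) 0 ∈ arr := by
        rw [PySem.List.pyGetD_eq_getElem arr 0 (by omega) (by exact_mod_cast (by omega : (m : Int) < (arr.length : Int)))]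
        exact List.getElem_mem _
      have hapos : 0 ≤ PySem.List.pyGetD arr (m : Int) 0 := hnn _ hamem
      set a := PySem.List.pyGetD arr (m : Int) 0 with ha
      rw [halve_eq_kB a cur hapos hcpos]
      set k := kB a cur with hk
      set arr' := PySem.List.pySetD arr (m : Int) (a >>> k.toNat) with harr'
      have hlen' : m < arr'.length := by rw [harr', PySem.List.length_pySetD]; omega
      have hnn' : ∀ x ∈ arr', 0 ≤ x := by
        intro x hx
        rw [harr', PySem.List.pySetD_of_nonneg arr _ (by omega)] at hx
        rcases List.mem_or_eq_of_mem_set hx with hx' | hx'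
        · exact hnn x hx'
        · subst hx'
          obtain ⟨A, hA⟩ : ∃ A : Nat, a = (A : Int) := ⟨a.toNat, by omega⟩
          rw [hA, shiftRight_cast]
          exact Int.natCast_nonneg _
      have hcur' : PySem.List.pyGetD arr' (m : Int) 0 = a >>> k.toNat := by
        rw [harr', PySem.List.pyGetD_pySetD_natCast arr m m _ 0 (by omega), if_pos rfl]
      have := ih arr' (ops + k) (a >>> k.toNat) hlen' hnn' hcur'
      rw [this]
      apply goB_congr
      intro i hi
      rw [PySem.List.mem_pyRange_neg_one] at hi
      obtain ⟨j, rfl⟩ : ∃ j : Nat, i = (j : Int) := ⟨i.toNat, by omega⟩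
      rw [harr', PySem.List.pyGetD_pySetD_natCast arr m j _ 0 (by omega),
          if_neg (by omega : j ≠ m)]

-- ===== VERDICT (by name: the statement is the Claim_ definition above) =====
theorem solve_spec : Claim_equal_solve := by
  intro n arr _hdom hpre
  obtain ⟨hlen, hnn⟩ := hpre
  unfold Spec_solve solve solve_alt
  by_cases hn : n < 2
  · rw [if_pos hn, PySem.List.pyRange_neg_one_eq_nil (by omega)]
    rfl
  · replace hn : 2 ≤ n := by omega
    have hle : n ≤ (arr.length : Int) := hlen hn
    set m : Nat := (n - 1).toNat with hm
    have hmn : (m : Int) = n - 1 := by omega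
    rw [if_neg (by omega)]
    have h1 : n - 2 = (m : Int) - 1 := by omega
    have h2 : PySem.List.pyGetD arr (n - 1) 0 = PySem.List.pyGetD arr (m : Int) 0 := by rw [hmn]
    rw [h1, h2]
    exact go_eq m arr 0 _ (by omega) hnn rfl
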